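-- pv_equiv track=rewrite | github.com/camargodev/programming-challenges | hackerrank/1-month-prep/week-2/sum-vs-xor.py | sum_equals_xor
-- ===== SOURCE A (Python) =====
-- def to_bin(dec):
--     return bin(dec)[2:]
--
-- def calculate_allowed_digits(bin_digit):
--     return 2 if bin_digit == '0' else 1
--
-- def sum_equals_xor(max_value):
--     if max_value == 0:
--         return 1
--     combinations = 1
--     for bin_digit in to_bin(max_value):
--         allowed_digits = calculate_allowed_digits(bin_digit)
--         combinations *= allowed_digits
--     return combinations
-- ===== SOURCE B (Python) =====
-- def _free_bits(n):
--     # 2**(number of zero bits of n), by recursion on the value itself: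
--     # strip the low bit with shifts, no binary-string formatting anywhere.
--     if n == 1:
--         return 1
--     r = _free_bits(n >> 1)
--     return r << 1 if n & 1 == 0 else r
--
-- def sum_equals_xor(max_value):
--     if max_value == 0:
--         return 1
--     return _free_bits(abs(max_value))
-- ===== Notes on version B (the rewrite author's own statement) =====
-- stated objective: alternative
-- what changed: Drops bin() string formatting and the per-character multiplicative loop entirely; B recurses arithmetically on the value itself, halving |n| with shifts and doubling the result for each even step.
import Mathlib
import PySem

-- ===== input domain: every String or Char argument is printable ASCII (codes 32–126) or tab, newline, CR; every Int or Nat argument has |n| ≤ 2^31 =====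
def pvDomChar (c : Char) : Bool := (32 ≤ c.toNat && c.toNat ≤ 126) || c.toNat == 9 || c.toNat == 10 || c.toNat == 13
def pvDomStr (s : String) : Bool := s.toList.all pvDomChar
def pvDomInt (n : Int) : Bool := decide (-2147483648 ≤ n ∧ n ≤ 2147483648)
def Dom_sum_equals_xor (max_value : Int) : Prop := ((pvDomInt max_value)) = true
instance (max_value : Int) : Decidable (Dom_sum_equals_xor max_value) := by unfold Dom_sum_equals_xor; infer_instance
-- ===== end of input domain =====

-- B drops the bin() string formatting and the per-character multiplicative loop and instead
-- recurses arithmetically on |n| itself, halving with shifts (objective: alternative).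

-- ===== PORT A =====
-- to_bin(dec) = bin(dec)[2:]
def to_bin (dec : Int) : List Char :=
  PySem.List.slice (PySem.Int.pyBin dec).toList (some 2) none

-- calculate_allowed_digits(bin_digit)
def calculate_allowed_digits (bin_digit : Char) : Int :=
  if bin_digit = '0' then 2 else 1

def sum_equals_xor (max_value : Int) : Int :=
  if max_value = 0 then 1
  else
    (to_bin max_value).foldl (fun combinations bin_digit =>
      combinations * calculate_allowed_digits bin_digit) 1

-- ===== PORT B =====
-- _free_bits(n) from Source B; only ever called with n ≥ 1, so it recurses on a Nat
-- (the 0-case is a totality guard Python never reaches).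
def pvFreeBits : Nat → Int
  | 0 => 1
  | 1 => 1
  | (n+2) =>
      let r := pvFreeBits ((n+2) >>> 1)
      if (n+2) &&& 1 == 0 then r <<< (1:Nat) else r
decreasing_by simp [Nat.shiftRight_succ, Nat.shiftRight_zero]; omega

def sum_equals_xor_alt (max_value : Int) : Int :=
  if max_value = 0 then 1
  else pvFreeBits max_value.natAbs

-- ===== PRECONDITION & SPEC =====
def Spec_sum_equals_xor (max_value : Int) (out : Int) : Prop := out = sum_equals_xor_alt max_value
instance (max_value : Int) (out : Int) : Decidable (Spec_sum_equals_xor max_value out) := by unfold Spec_sum_equals_xor; infer_instance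

-- ===== CLAIM =====
def Claim_equal_sum_equals_xor : Prop := ∀ (max_value : Int), Dom_sum_equals_xor max_value → Spec_sum_equals_xor max_value (sum_equals_xor max_value)

-- ===== LEMMAS AND PROOFS =====

-- A's loop is a running product of 2-per-'0'-char: it equals acc * 2 ^ (count of '0').
theorem foldl_allowed_eq_pow (cs : List Char) (acc : Int) :
    cs.foldl (fun combinations bin_digit =>
      combinations * calculate_allowed_digits bin_digit) acc
      = acc * 2 ^ cs.count '0' := by
  induction cs generalizing acc with
  | nil => simp
  | cons c cs ih =>
    rw [List.foldl_cons, ih]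
    simp only [calculate_allowed_digits, List.count_cons]
    by_cases h : c = '0'
    · simp [h, pow_succ]; ring
    · simp [h]

-- Nat.toDigitsCore structural facts -----------------------------------------

theorem toDigitsCore_append (f : Nat) : ∀ (n : Nat) (ds : List Char),
    Nat.toDigitsCore 2 f n ds = Nat.toDigitsCore 2 f n [] ++ ds := by
  induction f with
  | zero => intro n ds; simp [Nat.toDigitsCore]
  | succ f ih =>
    intro n ds
    simp only [Nat.toDigitsCore]
    by_cases h : n / 2 = 0
    · simp [h]
    · simp only [if_neg h]
      rw [ih (n / 2) (Nat.digitChar (n % 2) :: ds), ih (n / 2) [Nat.digitChar (n % 2)]]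
      simp

theorem toDigitsCore_fuel (n : Nat) : ∀ (f f' : Nat), n < f → n < f' →
    Nat.toDigitsCore 2 f n [] = Nat.toDigitsCore 2 f' n [] := by
  induction n using Nat.strong_induction_on with
  | _ n ih =>
    intro f f' hf hf'
    match f, f' with
    | f + 1, f' + 1 =>
      simp only [Nat.toDigitsCore]
      by_cases h : n / 2 = 0
      · simp [h]
      · simp only [if_neg h]
        rw [toDigitsCore_append f, toDigitsCore_append f']
        rw [ih (n / 2) (by omega) f f' (by omega) (by omega)]

theorem toDigits_step (n : Nat) (h : 2 ≤ n) :
    Nat.toDigits 2 n = Nat.toDigits 2 (n / 2) ++ [Nat.digitChar (n % 2)] := by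
  show Nat.toDigitsCore 2 (n + 1) n [] = Nat.toDigitsCore 2 (n / 2 + 1) (n / 2) [] ++ _
  have h2 : n / 2 ≠ 0 := by omega
  conv_lhs => rw [show n + 1 = n + 1 from rfl]
  simp only [Nat.toDigitsCore, if_neg h2]
  rw [toDigitsCore_append n]
  rw [toDigitsCore_fuel (n / 2) n (n / 2 + 1) (by omega) (by omega)]
  simp only [Nat.toDigitsCore]

-- B's arithmetic recursion equals 2 ^ (count of '0' in the binary string), for n ≥ 1.
theorem pvFreeBits_eq (n : Nat) (h : 1 ≤ n) :
    pvFreeBits n = 2 ^ ((Nat.toDigits 2 n).count '0') := by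
  induction n using Nat.strong_induction_on with
  | _ n ih =>
    match n, h with
    | 1, _ => simp only [pvFreeBits]; decide
    | (m+2), _ =>
      rw [pvFreeBits, toDigits_step (m+2) (by omega), List.count_append]
      have hsh : (m+2) >>> 1 = (m+2) / 2 := by
        simp [Nat.shiftRight_succ, Nat.shiftRight_zero]
      rw [ih ((m+2) >>> 1) (by rw [hsh]; omega) (by rw [hsh]; omega)]
      have hand : (m+2) &&& 1 = (m+2) % 2 := Nat.and_one_is_mod (m+2)
      rw [hsh, hand]
      rcases Nat.mod_two_eq_zero_or_one (m+2) with h2 | h2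
      · simp [h2, Nat.digitChar, Int.shiftLeft_eq, pow_succ]
      · simp [h2, Nat.digitChar]

-- the chars A loops over are exactly the binary digits of |n| (for n ≠ 0, after
-- dropping the "0b" / the "0" of "-0b"; the leftover 'b' of the negative case counts 0 zeros).
theorem count_to_bin (n : Int) :
    (to_bin n).count '0' = (Nat.toDigits 2 n.natAbs).count '0' := by
  unfold to_bin
  rw [PySem.Int.toList_pyBin]
  unfold PySem.Int.toBinChars0b
  by_cases h : n < 0
  · simp only [if_pos h]
    rw [show n.natAbs = n.natAbs from rfl]
    simp [PySem.List.slice]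
  · simp only [if_neg h]
    have : n.toNat = n.natAbs := by omega
    simp [PySem.List.slice, this]

-- ===== VERDICT =====
theorem sum_equals_xor_spec : Claim_equal_sum_equals_xor := by
  intro n _
  unfold Spec_sum_equals_xor sum_equals_xor sum_equals_xor_alt
  by_cases h : n = 0
  · simp [h]
  · have h1 : 1 ≤ n.natAbs := by omega
    simp only [if_neg h]
    rw [foldl_allowed_eq_pow, count_to_bin, pvFreeBits_eq n.natAbs h1, one_mul]
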